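-- pv_equiv track=rewrite | github.com/JLJVS/AdventofCode | 2023/Python/day13.py | find_horizontal_mirror
-- ===== SOURCE A (Python) =====
-- def find_horizontal_mirror(grid):
--     '''
--     '''
--     mirror_indices = []
--     N = len(grid)
--     for row in grid:
--         possible = set()
--         for x, _ in enumerate(row):
--             if x == 0 or x == N:
--                 continue
--             else:
--                 left = row[:x][::-1]
--                 right = row[x:]
--                 N_left, N_right = len(left), len(right)
--                 if N_left < N_right:
--                     right = right[:N_left]
--                 elif N_left > N_right:
--                     left = left[:N_right]
--                 if left==right:
--                     possible.add(x)
--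
--         mirror_indices.append(possible)
--     result = mirror_indices[0]
--     for p in mirror_indices[1:]:
--         result = result.intersection(p)
--     if len(result) == 1:
--         return list(result)[0]
--     return 0
-- ===== SOURCE B (Python) =====
-- def find_horizontal_mirror(grid):
--     # Sieve over mismatching symmetric column pairs: every unordered pair (j, k)
--     # with j < k and j + k odd reflects across the line x = (j + k + 1) // 2;
--     # any mismatch kills that line, survivors in range(1, min_width) are the mirrors.
--     w = min((len(row) for row in grid), default=0)
--     killed = set()
--     for row in grid:
--         for k in range(1, len(row)):
--             for j in range(k - 1, -1, -2):
--                 if row[j] != row[k]: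
--                     killed.add((j + k + 1) // 2)
--     cands = [x for x in range(1, w) if x not in killed]
--     if len(cands) == 1:
--         return cands[0]
--     return 0
-- ===== Notes on version B (the rewrite author's own statement) =====
-- stated objective: alternative
-- what changed: A sieve over mismatching symmetric column pairs replaces A's per-row mirror-set construction and set intersection: B enumerates, per row, every unordered index pair (j,k) with j<k and j+k odd, and on a character mismatch marks the reflection line (j+k+1)//2 in one global kill set; survivors of range(1, min_width) are the common mirrors, so there are no slices, no per-row sets and no intersections; B also drops A's stale guard 'x == N' (N = number of ROWS, evidently meant as a column bound), which wrongly discards the mirror column equal to the row count.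
-- intended difference: On grids where N = len(grid) is a mirror column of every row and there are at most two common mirror columns, A's stale 'x == N' guard (N is the ROW count, clearly meant to bound columns) discards column N, so A returns 0 where B returns N (unique common mirror N) or returns the other column where B returns 0 (two common mirrors); B's value is the intended one since the row count is irrelevant to column symmetry. — e.g. on find_horizontal_mirror(["abba", "abba"]): A returns 0, B returns 2
import Mathlib
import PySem

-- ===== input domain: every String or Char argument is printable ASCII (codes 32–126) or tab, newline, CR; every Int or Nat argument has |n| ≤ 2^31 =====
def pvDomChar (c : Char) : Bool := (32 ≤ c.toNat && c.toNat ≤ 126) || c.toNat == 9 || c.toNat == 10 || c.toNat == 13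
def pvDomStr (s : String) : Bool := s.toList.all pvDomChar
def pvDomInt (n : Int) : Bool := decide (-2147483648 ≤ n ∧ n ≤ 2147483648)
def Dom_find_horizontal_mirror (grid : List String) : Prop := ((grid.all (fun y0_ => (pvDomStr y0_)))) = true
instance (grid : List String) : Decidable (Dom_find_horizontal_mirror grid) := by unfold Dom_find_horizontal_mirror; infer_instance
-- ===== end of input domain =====

-- B replaces A's per-row mirror-set building + set intersection by a sieve: every mismatching
-- symmetric index pair (j, k) (j < k, j + k odd) of any row kills the reflection line
-- (j + k + 1) // 2 in one global kill set, and the survivors of range(1, min_width) are the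
-- common mirrors (no slices, no per-row sets, no intersections; same asymptotic cost).
-- B also drops A's stale 'x == N' guard (N = number of ROWS), an evident bug — see D_ below.

-- ===== PORT A =====
-- inner loop of A: the set of x with row[:x][::-1] (truncated) == row[x:] (truncated), skipping x == 0 and x == N
-- row[:x][::-1] is ported as (slice …).reverse (PySem.List.slice?_none_none_neg_one: s[::-1] is reverse)
def pvPossA (N : Int) (l : List Char) : PySem.Set Int :=
  (PySem.List.enumerate l).foldl (fun poss xc =>
    if xc.1 = 0 ∨ xc.1 = N then poss
    else
      let left := (PySem.List.slice l none (some xc.1)).reverse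
      let right := PySem.List.slice l (some xc.1) none
      let Nl : Int := left.length
      let Nr : Int := right.length
      let lr :=
        if Nl < Nr then (left, PySem.List.slice right none (some Nl))
        else if Nl > Nr then (PySem.List.slice left none (some Nr), right)
        else (left, right)
      if lr.1 == lr.2 then PySem.Set.add poss xc.1 else poss)
    PySem.Set.empty

def find_horizontal_mirror (grid : List String) : Int :=
  let N : Int := grid.length
  let mirror_indices : List (PySem.Set Int) :=
    grid.foldl (fun acc row => acc ++ [pvPossA N row.toList]) []
  match mirror_indices with
  | [] => 0  -- Python raises IndexError on mirror_indices[0]; excluded by Pre_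
  | r :: rest =>
    let result := rest.foldl (fun res p => PySem.Set.inter res p) r
    if PySem.Set.len result == 1 then (PySem.List.pyGet? result 0).getD 0 else 0

-- ===== PORT B =====
-- the two inner loops of B for one row: for k in range(1, len(row)): for j in range(k-1, -1, -2):
--   if row[j] != row[k]: killed.add((j+k+1)//2)
def pvKillRow (killed : PySem.Set Int) (l : List Char) : PySem.Set Int :=
  (PySem.List.pyRange 1 (l.length : Int) 1).foldl (fun kd k =>
    (PySem.List.pyRange (k - 1) (-1) (-2)).foldl (fun kd2 j =>
      if (PySem.List.pyGet? l j != PySem.List.pyGet? l k) then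
        PySem.Set.add kd2 (PySem.Int.floordiv (j + k + 1) 2)
      else kd2) kd) killed

def find_horizontal_mirror_alt (grid : List String) : Int :=
  let w := PySem.List.minD (grid.map (fun r => ((r.toList.length : Int)))) (fun v => v) 0
  let killed := grid.foldl (fun kd row => pvKillRow kd row.toList) PySem.Set.empty
  let cands := (PySem.List.pyRange 1 w 1).filter (fun x => !(PySem.Set.contains killed x))
  if cands.length == 1 then (PySem.List.pyGet? cands 0).getD 0 else 0

-- ===== PRECONDITION & SPEC =====
-- Pre_ excludes only the empty grid, on which A raises IndexError (mirror_indices[0]).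
def Pre_find_horizontal_mirror (grid : List String) : Prop := grid ≠ []
instance (grid : List String) : Decidable (Pre_find_horizontal_mirror grid) := by
  unfold Pre_find_horizontal_mirror; infer_instance
def pvWitness_find_horizontal_mirror : List String := ["#.##.#", "#.##.#"]

-- closed-form input predicate: x (≥ 1) is a mirror column of every row of the grid
def pvMirrorCol (grid : List String) (x : Nat) : Bool :=
  decide (1 ≤ x) && grid.all (fun r =>
    decide (x < r.toList.length) &&
    ((r.toList.take x).reverse.isPrefixOf (r.toList.drop x)
      || (r.toList.drop x).isPrefixOf (r.toList.take x).reverse))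

-- On grids where N = len(grid) is a mirror column of every row and there are at most two common
-- mirror columns, A's stale 'x == N' guard (N is the ROW count, clearly meant as a column bound)
-- discards column N, so A returns 0 where B returns N, or returns the other common column where B
-- returns 0; B's value is the intended one since the row count is irrelevant to column symmetry.
def D_find_horizontal_mirror (grid : List String) : Prop :=
  pvMirrorCol grid grid.length = true ∧
  (List.range (grid.headD "").toList.length).countP (pvMirrorCol grid) ≤ 2
instance (grid : List String) : Decidable (D_find_horizontal_mirror grid) := by
  unfold D_find_horizontal_mirror; infer_instance

def Spec_find_horizontal_mirror (grid : List String) (out : Int) : Prop :=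
  ¬ D_find_horizontal_mirror grid → out = find_horizontal_mirror_alt grid
instance (grid : List String) (out : Int) : Decidable (Spec_find_horizontal_mirror grid out) := by
  unfold Spec_find_horizontal_mirror; infer_instance

def pvDiffWitness_find_horizontal_mirror : List String := ["abba", "abba"]
def pvDiffWitnessOut_find_horizontal_mirror : Int × Int := (0, 2)

-- ===== CLAIM (what is proved, stated in full; the proofs are below) =====
def Claim_unchanged_find_horizontal_mirror : Prop :=
  ∀ (grid : List String), Dom_find_horizontal_mirror grid →
    Pre_find_horizontal_mirror grid →
    Spec_find_horizontal_mirror grid (find_horizontal_mirror grid)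
def Claim_changed_find_horizontal_mirror : Prop :=
  Dom_find_horizontal_mirror (pvDiffWitness_find_horizontal_mirror) ∧
  Pre_find_horizontal_mirror (pvDiffWitness_find_horizontal_mirror) ∧
  D_find_horizontal_mirror (pvDiffWitness_find_horizontal_mirror) ∧
  find_horizontal_mirror (pvDiffWitness_find_horizontal_mirror) = pvDiffWitnessOut_find_horizontal_mirror.1 ∧
  find_horizontal_mirror_alt (pvDiffWitness_find_horizontal_mirror) = pvDiffWitnessOut_find_horizontal_mirror.2 ∧
  pvDiffWitnessOut_find_horizontal_mirror.1 ≠ pvDiffWitnessOut_find_horizontal_mirror.2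
def Claim_exact_find_horizontal_mirror : Prop :=
  ∀ (grid : List String), Dom_find_horizontal_mirror grid →
    Pre_find_horizontal_mirror grid →
    D_find_horizontal_mirror grid →
    find_horizontal_mirror grid ≠ find_horizontal_mirror_alt grid

-- ===== LEMMAS AND PROOFS =====

-- proof-only helpers and lemmas

-- the shared final step of both ports ("return the single element, else 0")
def pvOut (l : List Int) : Int :=
  if l.length == 1 then (PySem.List.pyGet? l 0).getD 0 else 0

-- the condition under which A's inner loop adds x for row l (body of pvPossA as a predicate)
def pvCondA (N : Int) (l : List Char) (x : Int) : Bool :=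
  !(decide (x = 0) || decide (x = N)) &&
  (let left := (PySem.List.slice l none (some x)).reverse
   let right := PySem.List.slice l (some x) none
   let Nl : Int := left.length
   let Nr : Int := right.length
   let lr :=
     if Nl < Nr then (left, PySem.List.slice right none (some Nl))
     else if Nl > Nr then (PySem.List.slice left none (some Nr), right)
     else (left, right)
   lr.1 == lr.2)

-- "row l kills the line x": some symmetric pair (j, k) enumerated by B mismatches with center x
def pvKills (l : List Char) (x : Int) : Prop :=
  ∃ k ∈ PySem.List.pyRange 1 (l.length : Int) 1,
    ∃ j ∈ PySem.List.pyRange (k - 1) (-1) (-2),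
      (PySem.List.pyGet? l j != PySem.List.pyGet? l k) = true ∧
      PySem.Int.floordiv (j + k + 1) 2 = x

-- the global kill set B builds
def pvKilled (grid : List String) : PySem.Set Int :=
  grid.foldl (fun kd row => pvKillRow kd row.toList) PySem.Set.empty

-- the list of common mirror columns as B computes it (survivors of the sieve)
def pvSB (grid : List String) : List Int :=
  (PySem.List.pyRange 1
    (PySem.List.minD (grid.map (fun r => ((r.toList.length : Int)))) (fun v => v) 0) 1).filter
    (fun x => !(PySem.Set.contains (pvKilled grid) x))

-- pointwise mirror condition at column k of row l
def pvPt (l : List Char) (k : Nat) : Prop :=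
  ∀ i, i < min k (l.length - k) → l.getD (k-1-i) ' ' = l.getD (k+i) ' '

lemma pv_sorted_eq {l₁ l₂ : List Int} (h₁ : List.Pairwise (· < ·) l₁)
    (h₂ : List.Pairwise (· < ·) l₂) (hm : ∀ x, x ∈ l₁ ↔ x ∈ l₂) : l₁ = l₂ :=
  List.Perm.eq_of_pairwise (fun _ _ _ _ hab hba => absurd hba (not_lt.2 hab.le)) h₁ h₂
    ((List.perm_ext_iff_of_nodup (h₁.imp fun h => ne_of_lt h) (h₂.imp fun h => ne_of_lt h)).2 hm)

lemma pv_enum_fst (l : List Char) : ∀ s : Int,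
    (PySem.List.enumerate l s).map Prod.fst = PySem.List.pyRange s (s + l.length) 1 := by
  induction l with
  | nil => intro s; simp [PySem.List.enumerate, PySem.List.pyRange_one]
  | cons x t ih =>
    intro s
    have hcons : PySem.List.enumerate (x :: t) s = (s, x) :: PySem.List.enumerate t (s+1) := by
      simp [PySem.List.enumerate]
    have hrhs : PySem.List.pyRange s (s + ((x :: t).length : Int)) 1
        = s :: PySem.List.pyRange (s + 1) (s + ((x :: t).length : Int)) 1 :=
      PySem.List.pyRange_one_cons (by push_cast [List.length_cons]; omega)
    have hstop : s + 1 + (t.length : Int) = s + ((x :: t).length : Int) := by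
      push_cast [List.length_cons]
      ring
    rw [hcons, List.map_cons, ih (s+1), hstop, hrhs]

lemma pv_foldl_cond_add (c : Int → Bool) :
    ∀ (xs : List Int) (s : PySem.Set Int),
      xs.foldl (fun s x => if c x then PySem.Set.add s x else s) s
        = PySem.Set.update s (xs.filter c) := by
  intro xs
  induction xs with
  | nil => intro s; simp [PySem.Set.update]
  | cons x t ih =>
    intro s
    by_cases hx : c x
    · simp only [List.foldl_cons, List.filter_cons, hx, if_pos, PySem.Set.update_cons]
      exact ih _
    · simp only [List.foldl_cons, List.filter_cons, hx, Bool.false_eq_true, if_neg,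
        not_false_iff]
      exact ih _

lemma pv_possA_eq (N : Int) (l : List Char) :
    pvPossA N l = (PySem.List.pyRange 0 (l.length : Int) 1).filter (pvCondA N l) := by
  unfold pvPossA
  have hb : (fun (poss : PySem.Set Int) (xc : Int × Char) =>
      if xc.1 = 0 ∨ xc.1 = N then poss
      else
        let left := (PySem.List.slice l none (some xc.1)).reverse
        let right := PySem.List.slice l (some xc.1) none
        let Nl : Int := left.length
        let Nr : Int := right.length
        let lr :=
          if Nl < Nr then (left, PySem.List.slice right none (some Nl))
          else if Nl > Nr then (PySem.List.slice left none (some Nr), right)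
          else (left, right)
        if lr.1 == lr.2 then PySem.Set.add poss xc.1 else poss)
      = (fun (poss : PySem.Set Int) (xc : Int × Char) =>
          if pvCondA N l xc.1 then PySem.Set.add poss xc.1 else poss) := by
    funext poss xc
    by_cases h0 : xc.1 = 0 ∨ xc.1 = N
    · have hdec : (decide (xc.1 = 0) || decide (xc.1 = N)) = true := by
        rcases h0 with h | h <;> simp [h]
      simp [pvCondA, h0, hdec]
    · have h1 : ¬ xc.1 = 0 := fun h => h0 (Or.inl h)
      have h2 : ¬ xc.1 = N := fun h => h0 (Or.inr h)
      simp [pvCondA, h0, h1, h2]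
  rw [hb, ← List.foldl_map (f := Prod.fst)
      (g := fun poss x => if pvCondA N l x then PySem.Set.add poss x else poss),
    pv_enum_fst l 0, pv_foldl_cond_add]
  show PySem.Set.update [] _ = _
  rw [PySem.Set.update_nil_left, PySem.Set.ofList_eq_self_of_nodup _
    (List.Sublist.nodup (List.filter_sublist) (PySem.List.nodup_pyRange_one _ _))]
  norm_num

lemma pv_foldl_inter :
    ∀ (sets : List (PySem.Set Int)) (r : List Int),
      sets.foldl (fun res p => PySem.Set.inter res p) r
        = r.filter (fun x => sets.all (fun p => p.contains x)) := by
  intro sets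
  induction sets with
  | nil => intro r; simp
  | cons s t ih =>
    intro r
    simp only [List.foldl_cons]
    rw [ih]
    show (PySem.Set.inter r s).filter _ = _
    rw [PySem.Set.inter, List.filter_filter]
    apply List.filter_congr
    intro a _
    simp [List.all_cons, Bool.and_comm]

lemma pv_mem_foldl {β : Type} (a : Int) (g : PySem.Set Int → β → PySem.Set Int) (P : β → Prop)
    (hg : ∀ s y, a ∈ g s y ↔ a ∈ s ∨ P y) :
    ∀ (xs : List β) (s : PySem.Set Int), a ∈ xs.foldl g s ↔ a ∈ s ∨ ∃ y ∈ xs, P y := by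
  intro xs
  induction xs with
  | nil => intro s; simp
  | cons y t ih =>
    intro s
    rw [List.foldl_cons, ih, hg]
    constructor
    · rintro ((h | h) | ⟨z, hz, hp⟩)
      · exact Or.inl h
      · exact Or.inr ⟨y, List.mem_cons_self .., h⟩
      · exact Or.inr ⟨z, List.mem_cons_of_mem _ hz, hp⟩
    · rintro (h | ⟨z, hz, hp⟩)
      · exact Or.inl (Or.inl h)
      · rcases List.mem_cons.mp hz with rfl | hz'
        · exact Or.inl (Or.inr hp)
        · exact Or.inr ⟨z, hz', hp⟩

lemma pv_killRow_mem (kd : PySem.Set Int) (l : List Char) (x : Int) :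
    x ∈ pvKillRow kd l ↔ x ∈ kd ∨ pvKills l x := by
  unfold pvKillRow pvKills
  exact pv_mem_foldl x _
    (fun k => ∃ j ∈ PySem.List.pyRange (k - 1) (-1) (-2),
      (PySem.List.pyGet? l j != PySem.List.pyGet? l k) = true ∧
      PySem.Int.floordiv (j + k + 1) 2 = x)
    (fun s k => pv_mem_foldl x _
      (fun j => (PySem.List.pyGet? l j != PySem.List.pyGet? l k) = true ∧
        PySem.Int.floordiv (j + k + 1) 2 = x)
      (fun s2 j => by
        by_cases hc : (PySem.List.pyGet? l j != PySem.List.pyGet? l k) = true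
        · rw [if_pos hc, PySem.Set.mem_add]; tauto
        · rw [if_neg hc]; tauto)
      _ s) _ kd

lemma pv_mem_killed (grid : List String) (x : Int) :
    x ∈ pvKilled grid ↔ ∃ r ∈ grid, pvKills r.toList x := by
  unfold pvKilled
  rw [pv_mem_foldl x _ (fun r => pvKills r.toList x)
    (fun s r => pv_killRow_mem s r.toList x) grid PySem.Set.empty]
  simp [PySem.Set.empty]

lemma pv_mem_pyRange_neg_two (a x : Int) :
    x ∈ PySem.List.pyRange a (-1) (-2) ↔ 0 ≤ x ∧ x ≤ a ∧ 2 ∣ a - x := by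
  unfold PySem.List.pyRange
  rw [if_neg (by norm_num)]
  rw [if_neg (by norm_num : ¬ (0:Int) < -2)]
  have h1 : a - -1 + - -2 - 1 = a + 2 := by ring
  have hc : (a - -1 + - -2 - 1) / - -2 = (a + 2) / 2 := by rw [h1]; norm_num
  by_cases ha : (-1:Int) < a
  · rw [if_pos ha, hc]
    simp only [List.mem_map, List.mem_range]
    constructor
    · rintro ⟨t, ht, rfl⟩
      refine ⟨?_, ?_, ⟨t, by ring⟩⟩ <;> omega
    · rintro ⟨h0, hxa, t, ht⟩
      refine ⟨t.toNat, by omega, by omega⟩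
  · rw [if_neg ha]
    simp only [List.range_zero, List.map_nil, List.not_mem_nil, false_iff, not_and]
    intro h0 hxa
    omega

lemma pv_kills_iff (l : List Char) (n : Nat) (h1 : 1 ≤ n) (hL : n < l.length) :
    pvKills l ((n : Nat) : Int) ↔ ¬ pvPt l n := by
  unfold pvKills pvPt
  constructor
  · rintro ⟨k, hk, j, hj, hne, hctr⟩
    rw [PySem.List.mem_pyRange_one] at hk
    rw [pv_mem_pyRange_neg_two] at hj
    obtain ⟨hj0, hjk, t, ht⟩ := hj
    rw [PySem.Int.floordiv_eq_iff_of_pos (by norm_num)] at hctr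
    have hsum : j + k = 2*(n:Int) - 1 := by omega
    intro hpt
    set i : Nat := (k - (n:Int)).toNat with hi
    have hiub : i < min n (l.length - n) := by omega
    have heq := hpt i hiub
    have hjn : j = ((n - 1 - i : Nat) : Int) := by omega
    have hkn : k = ((n + i : Nat) : Int) := by omega
    rw [hjn, hkn, PySem.List.pyGet?_natCast, PySem.List.pyGet?_natCast] at hne
    have hb1 : n - 1 - i < l.length := by omega
    have hb2 : n + i < l.length := by omega
    rw [List.getElem?_eq_getElem hb1, List.getElem?_eq_getElem hb2] at hne
    simp only [bne_iff_ne, ne_eq, Option.some.injEq] at hne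
    rw [List.getD_eq_getElem l ' ' hb1, List.getD_eq_getElem l ' ' hb2] at heq
    exact hne heq
  · intro hnot
    push_neg at hnot
    obtain ⟨i, hiub, hne⟩ := hnot
    refine ⟨((n + i : Nat) : Int), ?_, ((n - 1 - i : Nat) : Int), ?_, ?_, ?_⟩
    · rw [PySem.List.mem_pyRange_one]; push_cast; omega
    · rw [pv_mem_pyRange_neg_two]
      refine ⟨by omega, by push_cast; omega, ?_⟩
      push_cast
      omega
    · have hb1 : n - 1 - i < l.length := by omega
      have hb2 : n + i < l.length := by omega
      rw [PySem.List.pyGet?_natCast, PySem.List.pyGet?_natCast,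
        List.getElem?_eq_getElem hb1, List.getElem?_eq_getElem hb2]
      simp only [bne_iff_ne, ne_eq, Option.some.injEq]
      rw [List.getD_eq_getElem l ' ' hb1, List.getD_eq_getElem l ' ' hb2] at hne
      exact hne
    · rw [PySem.Int.floordiv_eq_iff_of_pos (by norm_num)]
      push_cast
      omega

lemma pv_take_eq_iff (l : List Char) (k : Nat) (hk : 0 < k) (hkl : k < l.length) :
    ((l.take k).reverse.take (min k (l.length - k)) = (l.drop k).take (min k (l.length - k)))
      ↔ pvPt l k := by
  set m := min k (l.length - k) with hm
  have hmk : m ≤ k := Nat.min_le_left _ _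
  have hmr : m ≤ l.length - k := Nat.min_le_right _ _
  have hlen1 : ((l.take k).reverse.take m).length = m := by simp; omega
  have hlen2 : ((l.drop k).take m).length = m := by simp; omega
  have hget1 : ∀ i, i < m → ((l.take k).reverse.take m)[i]? = some (l.getD (k-1-i) ' ') := by
    intro i hi
    have hi1 : i < ((l.take k).reverse.take m).length := by rw [hlen1]; exact hi
    rw [List.getElem?_eq_getElem hi1, List.getElem_take, List.getElem_reverse, List.getElem_take]
    have hb : k - 1 - i < l.length := by omega
    have hidx : (l.take k).length - 1 - i = k - 1 - i := by
      simp [List.length_take]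
      omega
    simp only [hidx]
    rw [List.getD_eq_getElem l ' ' hb]
  have hget2 : ∀ i, i < m → ((l.drop k).take m)[i]? = some (l.getD (k+i) ' ') := by
    intro i hi
    have hi2 : i < ((l.drop k).take m).length := by rw [hlen2]; exact hi
    rw [List.getElem?_eq_getElem hi2, List.getElem_take, List.getElem_drop]
    have hb : k + i < l.length := by omega
    rw [List.getD_eq_getElem l ' ' hb]
  constructor
  · intro heq i hi
    have h := congrArg (fun t => t[i]?) heq
    simp only at h
    rw [hget1 i hi, hget2 i hi] at h
    exact Option.some_injective _ h
  · intro hp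
    apply List.ext_getElem?
    intro i
    by_cases hi : i < m
    · rw [hget1 i hi, hget2 i hi, hp i hi]
    · have hge1 : (List.take m (l.take k).reverse).length ≤ i := by omega
      have hge2 : (List.take m (l.drop k)).length ≤ i := by omega
      rw [List.getElem?_eq_none hge1, List.getElem?_eq_none hge2]

lemma pv_condA_ne_zero {N : Int} {l : List Char} {x : Int} (h : pvCondA N l x = true) :
    x ≠ 0 ∧ x ≠ N := by
  unfold pvCondA at h
  simp only [Bool.and_eq_true, Bool.not_eq_true', Bool.or_eq_false_iff,
    decide_eq_false_iff_not] at h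
  exact h.1

lemma pv_condA_iff (N : Int) (l : List Char) (k : Nat) (hk : 0 < k) (hkl : k < l.length) :
    pvCondA N l (k : Int) = true ↔ ((k : Int) ≠ N ∧ pvPt l k) := by
  have hleft : PySem.List.slice l none (some (k : Int)) = l.take k :=
    PySem.List.slice_to_natCast ..
  have hright : PySem.List.slice l (some (k : Int)) none = l.drop k :=
    PySem.List.slice_from_natCast ..
  have hsplit : pvCondA N l (k : Int)
      = (!(decide ((k:Int) = 0) || decide ((k:Int) = N)) &&
         ((l.take k).reverse.take (min k (l.length - k))
            == (l.drop k).take (min k (l.length - k)))) := by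
    simp only [pvCondA, hleft, hright, List.length_reverse, List.length_take,
      List.length_drop, Nat.min_eq_left hkl.le]
    rcases lt_trichotomy k (l.length - k) with hlt | heq | hgt
    · have hc : ((k : Nat) : Int) < ((l.length - k : Nat) : Int) := by exact_mod_cast hlt
      rw [if_pos hc]
      have h2 : PySem.List.slice (l.drop k) none (some ((k : Nat) : Int)) = (l.drop k).take k :=
        PySem.List.slice_to_natCast ..
      have htake : ((l.take k).reverse).take k = (l.take k).reverse := by
        apply List.take_of_length_le
        simp [Nat.min_eq_left hkl.le]
      rw [h2, Nat.min_eq_left hlt.le, htake]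
    · have hc1 : ¬ (((k : Nat) : Int) < ((l.length - k : Nat) : Int)) := by omega
      have hc2 : ¬ (((l.length - k : Nat) : Int) < ((k : Nat) : Int)) := by omega
      rw [if_neg hc1, if_neg hc2]
      have hmin : min k (l.length - k) = k := by omega
      have htake1 : ((l.take k).reverse).take k = (l.take k).reverse := by
        apply List.take_of_length_le
        simp [Nat.min_eq_left hkl.le]
      have htake2 : (l.drop k).take k = l.drop k := by
        apply List.take_of_length_le
        simp
        omega
      rw [hmin, htake1, htake2]
    · have hc1 : ¬ (((k : Nat) : Int) < ((l.length - k : Nat) : Int)) := by omega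
      have hc2 : ((l.length - k : Nat) : Int) < ((k : Nat) : Int) := by omega
      rw [if_neg hc1, if_pos hc2]
      have h2 : PySem.List.slice ((l.take k).reverse) none (some ((l.length - k : Nat) : Int))
          = ((l.take k).reverse).take (l.length - k) :=
        PySem.List.slice_to_natCast ..
      have hmin : min k (l.length - k) = l.length - k := by omega
      have htake2 : (l.drop k).take (l.length - k) = l.drop k := by
        apply List.take_of_length_le
        simp
      rw [h2, hmin, htake2]
  rw [hsplit, Bool.and_eq_true, beq_iff_eq, pv_take_eq_iff l k hk hkl]
  have hk0 : ((k : Int) ≠ 0) := by omega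
  simp only [Bool.not_eq_true', Bool.or_eq_false_iff, decide_eq_false_iff_not]
  constructor
  · rintro ⟨⟨_, hN⟩, hp⟩
    exact ⟨hN, hp⟩
  · rintro ⟨hN, hp⟩
    exact ⟨⟨hk0, hN⟩, hp⟩

lemma pv_prefix_or_iff (a b : List Char) :
    (a.isPrefixOf b || b.isPrefixOf a) = true
      ↔ a.take (min a.length b.length) = b.take (min a.length b.length) := by
  rw [Bool.or_eq_true, List.isPrefixOf_iff_prefix, List.isPrefixOf_iff_prefix]
  constructor
  · rintro (h | h)
    · rw [Nat.min_eq_left h.length_le, List.take_length]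
      exact List.prefix_iff_eq_take.mp h
    · rw [Nat.min_eq_right h.length_le, List.take_length]
      exact (List.prefix_iff_eq_take.mp h).symm
  · intro h
    rcases Nat.le_total a.length b.length with hle | hle
    · rw [Nat.min_eq_left hle, List.take_length] at h
      exact Or.inl (List.prefix_iff_eq_take.mpr h)
    · rw [Nat.min_eq_right hle, List.take_length] at h
      exact Or.inr (List.prefix_iff_eq_take.mpr h.symm)

lemma pv_mirrorCol_iff (grid : List String) (k : Nat) :
    pvMirrorCol grid k = true ↔ (1 ≤ k ∧ ∀ r ∈ grid, k < r.toList.length ∧ pvPt r.toList k) := by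
  unfold pvMirrorCol
  simp only [Bool.and_eq_true, decide_eq_true_eq, List.all_eq_true]
  constructor
  · rintro ⟨h1, h2⟩
    refine ⟨h1, fun r hr => ?_⟩
    obtain ⟨hlen, hpre⟩ := h2 r hr
    refine ⟨hlen, ?_⟩
    have hmm := (pv_prefix_or_iff _ _).mp hpre
    rw [List.length_reverse, List.length_take, List.length_drop,
      Nat.min_eq_left hlen.le] at hmm
    exact (pv_take_eq_iff _ _ (by omega) hlen).mp hmm
  · rintro ⟨h1, h2⟩
    refine ⟨h1, fun r hr => ?_⟩
    obtain ⟨hlen, hpt⟩ := h2 r hr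
    refine ⟨hlen, (pv_prefix_or_iff _ _).mpr ?_⟩
    rw [List.length_reverse, List.length_take, List.length_drop, Nat.min_eq_left hlen.le]
    exact (pv_take_eq_iff _ _ (by omega) hlen).mpr hpt

lemma pv_lt_w_iff (r0 : String) (rest : List String) (x : Int) :
    x < PySem.List.minD ((r0 :: rest).map (fun r => ((r.toList.length : Int)))) (fun v => v) 0
      ↔ ∀ r ∈ r0 :: rest, x < (r.toList.length : Int) := by
  have hmap : ((r0 :: rest).map (fun r => ((r.toList.length : Int))))
      = (r0.toList.length : Int) :: rest.map (fun r => ((r.toList.length : Int))) := rfl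
  rw [PySem.List.minD, hmap, PySem.List.min?_id_cons]
  simp only [Option.getD_some]
  have hle := PySem.List.foldl_min_le (rest.map (fun r => ((r.toList.length : Int))))
    (r0.toList.length : Int)
  have hmem := PySem.List.foldl_min_mem (rest.map (fun r => ((r.toList.length : Int))))
    (r0.toList.length : Int)
  constructor
  · intro hx r hr
    rcases List.mem_cons.mp hr with rfl | hr'
    · exact lt_of_lt_of_le hx hle.1
    · exact lt_of_lt_of_le hx (hle.2 _ (List.mem_map_of_mem hr'))
  · intro hall
    rcases hmem with heq | hmem'
    · rw [heq]; exact hall r0 (List.mem_cons_self ..)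
    · obtain ⟨r, hr, heq⟩ := List.mem_map.mp hmem'
      rw [← heq]
      exact hall r (List.mem_cons_of_mem _ hr)

lemma pv_mem_SB (grid : List String) (hg : grid ≠ []) (x : Int) :
    x ∈ pvSB grid ↔ (0 ≤ x ∧ pvMirrorCol grid x.toNat = true) := by
  obtain ⟨r0, rest, rfl⟩ := List.exists_cons_of_ne_nil hg
  unfold pvSB
  rw [List.mem_filter, PySem.List.mem_pyRange_one]
  have hnk : ∀ y : Int, (!(PySem.Set.contains (pvKilled (r0 :: rest)) y)) = true
      ↔ ¬ (∃ r ∈ r0 :: rest, pvKills r.toList y) := by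
    intro y
    rw [Bool.not_eq_eq_eq_not, Bool.not_true, ← Bool.not_eq_true,
      PySem.Set.contains_iff, pv_mem_killed]
  constructor
  · rintro ⟨⟨h1, hw⟩, hk⟩
    have hlt := (pv_lt_w_iff r0 rest x).mp hw
    have hx' : ((x.toNat : Nat) : Int) = x := by omega
    refine ⟨by omega, (pv_mirrorCol_iff _ _).mpr ⟨by omega, fun r hr => ?_⟩⟩
    have hxlen : x.toNat < r.toList.length := by have := hlt r hr; omega
    refine ⟨hxlen, ?_⟩
    by_contra hpt
    have hkills : pvKills r.toList x := by
      rw [← hx']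
      exact (pv_kills_iff r.toList x.toNat (by omega) hxlen).mpr hpt
    exact ((hnk x).mp hk) ⟨r, hr, hkills⟩
  · rintro ⟨h0, hcol⟩
    obtain ⟨h1, hrows⟩ := (pv_mirrorCol_iff _ _).mp hcol
    have hx' : ((x.toNat : Nat) : Int) = x := by omega
    refine ⟨⟨by omega, (pv_lt_w_iff r0 rest x).mpr fun r hr => by have := (hrows r hr).1; omega⟩,
      (hnk x).mpr ?_⟩
    rintro ⟨r, hr, hkills⟩
    rw [← hx'] at hkills
    exact (pv_kills_iff r.toList x.toNat (by omega) (hrows r hr).1).mp hkills (hrows r hr).2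

lemma pv_SB_pairwise (grid : List String) : (pvSB grid).Pairwise (· < ·) :=
  List.Pairwise.sublist (List.filter_sublist) (PySem.List.pairwise_lt_pyRange_one _ _)

lemma pv_B_eq (grid : List String) : find_horizontal_mirror_alt grid = pvOut (pvSB grid) := rfl

lemma pv_out_congr (l : List Int) :
    (if PySem.Set.len l == 1 then (PySem.List.pyGet? l 0).getD 0 else 0) = pvOut l := by
  unfold pvOut PySem.Set.len
  by_cases h : l.length = 1 <;> simp [h]

lemma pv_A_eq (r0 : String) (rest : List String) :
    find_horizontal_mirror (r0 :: rest)
      = pvOut ((pvSB (r0 :: rest)).filter (fun x => x != ((r0 :: rest).length : Int))) := by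
  have hg : (r0 :: rest : List String) ≠ [] := by simp
  simp only [find_horizontal_mirror, PySem.List.foldl_append_singleton_eq_map, List.nil_append,
    List.map_cons]
  rw [pv_foldl_inter, pv_out_congr]
  simp only [pv_possA_eq]
  refine congrArg pvOut (pv_sorted_eq ?_ ?_ ?_)
  · exact List.Pairwise.sublist (List.filter_sublist)
      (List.Pairwise.sublist (List.filter_sublist) (PySem.List.pairwise_lt_pyRange_one _ _))
  · exact List.Pairwise.sublist (List.filter_sublist) (pv_SB_pairwise _)
  · intro x
    constructor
    · intro hx
      obtain ⟨hx1, hall⟩ := List.mem_filter.mp hx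
      obtain ⟨hxr, hcond0⟩ := List.mem_filter.mp hx1
      obtain ⟨hx0, hxlen0⟩ := PySem.List.mem_pyRange_one.mp hxr
      obtain ⟨hne0, hneN⟩ := pv_condA_ne_zero hcond0
      have hx' : ((x.toNat : Nat) : Int) = x := by omega
      have hk0 : 0 < x.toNat := by omega
      have hrest : ∀ r ∈ rest, x.toNat < r.toList.length ∧ pvPt r.toList x.toNat := by
        intro r hr
        have hmem := (List.all_eq_true.mp hall) _ (List.mem_map_of_mem hr)
        rw [PySem.Set.contains_iff, List.mem_filter, PySem.List.mem_pyRange_one] at hmem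
        obtain ⟨⟨_, hxl⟩, hcond⟩ := hmem
        have hklen : x.toNat < r.toList.length := by omega
        rw [← hx'] at hcond
        exact ⟨hklen, ((pv_condA_iff _ _ _ hk0 hklen).mp hcond).2⟩
      have hlen0 : x.toNat < r0.toList.length := by omega
      rw [← hx'] at hcond0
      have hpt0 := ((pv_condA_iff _ _ _ hk0 hlen0).mp hcond0).2
      refine List.mem_filter.mpr ⟨(pv_mem_SB _ hg x).mpr ⟨by omega,
        (pv_mirrorCol_iff _ _).mpr ⟨by omega, fun r hr => ?_⟩⟩, by simpa using hneN⟩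
      rcases List.mem_cons.mp hr with rfl | hr'
      · exact ⟨hlen0, hpt0⟩
      · exact hrest r hr'
    · intro hx
      obtain ⟨hSB, hxne⟩ := List.mem_filter.mp hx
      have hxneN : x ≠ ((r0 :: rest).length : Int) := by simpa using hxne
      obtain ⟨hx0, hcol⟩ := (pv_mem_SB _ hg x).mp hSB
      obtain ⟨hk1, hrows⟩ := (pv_mirrorCol_iff _ _).mp hcol
      have hx' : ((x.toNat : Nat) : Int) = x := by omega
      have hk0 : 0 < x.toNat := by omega
      have hlen0 := hrows r0 (List.mem_cons_self ..)
      refine List.mem_filter.mpr ⟨List.mem_filter.mpr ⟨PySem.List.mem_pyRange_one.mpr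
        ⟨hx0, by have := hlen0.1; omega⟩, ?_⟩, List.all_eq_true.mpr ?_⟩
      · rw [← hx']
        exact (pv_condA_iff _ _ _ hk0 hlen0.1).mpr ⟨by rw [hx']; exact hxneN, hlen0.2⟩
      · intro p hp
        obtain ⟨r, hr, rfl⟩ := List.mem_map.mp hp
        rw [PySem.Set.contains_iff, List.mem_filter, PySem.List.mem_pyRange_one]
        have hrr := hrows r (List.mem_cons_of_mem _ hr)
        refine ⟨⟨hx0, by have := hrr.1; omega⟩, ?_⟩
        rw [← hx']
        exact (pv_condA_iff _ _ _ hk0 hrr.1).mpr ⟨by rw [hx']; exact hxneN, hrr.2⟩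

lemma pv_SB_eq_good (r0 : String) (rest : List String) :
    pvSB (r0 :: rest) = List.map (fun n : Nat => (n : Int))
      ((List.range r0.toList.length).filter (pvMirrorCol (r0 :: rest))) := by
  have hg : (r0 :: rest : List String) ≠ [] := by simp
  apply pv_sorted_eq (pv_SB_pairwise _)
  · exact List.Pairwise.map _ (fun a b hab => by exact_mod_cast hab)
      (List.Pairwise.sublist (List.filter_sublist) (List.pairwise_lt_range))
  · intro x
    rw [pv_mem_SB _ hg]
    constructor
    · rintro ⟨h0, hcol⟩
      obtain ⟨h1, hrows⟩ := (pv_mirrorCol_iff _ _).mp hcol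
      refine List.mem_map.mpr ⟨x.toNat, List.mem_filter.mpr ⟨List.mem_range.mpr ?_, hcol⟩,
        by omega⟩
      exact (hrows r0 (List.mem_cons_self ..)).1
    · intro hx
      obtain ⟨n, hn, rfl⟩ := List.mem_map.mp hx
      obtain ⟨_, hcol⟩ := List.mem_filter.mp hn
      exact ⟨by positivity, by simpa using hcol⟩

lemma pv_pyGet_zero (a : Int) (t : List Int) : PySem.List.pyGet? (a :: t) 0 = some a := by
  have h := PySem.List.pyGet?_natCast (a :: t) 0
  simpa using h

lemma pv_pvOut_singleton (a : Int) : pvOut [a] = a := by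
  simp [pvOut, pv_pyGet_zero]

lemma pv_pvOut_ne_one {l : List Int} (h : l.length ≠ 1) : pvOut l = 0 := by
  simp [pvOut, h]

-- ===== VERDICT (by name: the statement is the Claim_ definition above) =====
theorem find_horizontal_mirror_spec : Claim_unchanged_find_horizontal_mirror := by
  intro grid _ hpre hnd
  have hg : grid ≠ [] := hpre
  unfold D_find_horizontal_mirror at hnd
  obtain ⟨r0, rest, rfl⟩ := List.exists_cons_of_ne_nil hg
  show find_horizontal_mirror _ = find_horizontal_mirror_alt _
  rw [pv_A_eq, pv_B_eq]
  set N : Int := (((r0 :: rest).length : Nat) : Int) with hN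
  set S := pvSB (r0 :: rest) with hS
  have hnodup : S.Nodup := (pv_SB_pairwise _).imp fun h => ne_of_lt h
  by_cases hNS : N ∈ S
  · have hcol : pvMirrorCol (r0 :: rest) (r0 :: rest).length = true := by
      have := (pv_mem_SB _ hg N).mp hNS
      simpa using this.2
    have hcount : ¬ (List.range ((r0 :: rest).headD "").toList.length).countP
        (pvMirrorCol (r0 :: rest)) ≤ 2 := fun hle => hnd ⟨hcol, hle⟩
    rw [List.headD_cons, List.countP_eq_length_filter] at hcount
    have hSlen : 3 ≤ S.length := by
      rw [hS, pv_SB_eq_good, List.length_map]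
      omega
    have hfilt : (S.filter (fun x => x != N)).length = S.length - 1 := by
      rw [← List.Nodup.erase_eq_filter hnodup N]
      exact List.length_erase_of_mem hNS
    rw [pv_pvOut_ne_one (by omega), pv_pvOut_ne_one (by omega)]
  · have heq : S.filter (fun x => x != N) = S :=
      List.filter_eq_self.mpr fun a ha => by
        simp only [bne_iff_ne, ne_eq, decide_eq_true_eq]
        exact fun h => hNS (h ▸ ha)
    rw [heq]

theorem find_horizontal_mirror_changed : Claim_changed_find_horizontal_mirror := by
  unfold Claim_changed_find_horizontal_mirror; decide

theorem find_horizontal_mirror_tight : Claim_exact_find_horizontal_mirror := by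
  intro grid _ hpre hd
  have hg : grid ≠ [] := hpre
  unfold D_find_horizontal_mirror at hd
  obtain ⟨hcol, hcount⟩ := hd
  obtain ⟨r0, rest, rfl⟩ := List.exists_cons_of_ne_nil hg
  rw [pv_A_eq, pv_B_eq]
  set N : Int := (((r0 :: rest).length : Nat) : Int) with hN
  set S := pvSB (r0 :: rest) with hS
  have hnodup : S.Nodup := (pv_SB_pairwise _).imp fun h => ne_of_lt h
  have hNS : N ∈ S := by
    rw [hS, pv_mem_SB _ hg]
    refine ⟨by rw [hN]; positivity, by simpa using hcol⟩
  rw [List.headD_cons, List.countP_eq_length_filter] at hcount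
  have hSlen : S.length ≤ 2 := by
    rw [hS, pv_SB_eq_good, List.length_map]
    omega
  have hmem_pos : ∀ y ∈ S, 1 ≤ y := by
    intro y hy
    have hmem := (pv_mem_SB _ hg y).mp hy
    have h1 := ((pv_mirrorCol_iff _ _).mp hmem.2).1
    omega
  have hN1 : 1 ≤ N := by rw [hN]; simp
  have hlen1 : 1 ≤ S.length := List.length_pos_of_mem hNS
  have hcase : S.length = 1 ∨ S.length = 2 := by omega
  rcases hcase with h1 | h2
  · obtain ⟨a, ha⟩ := List.length_eq_one_iff.mp h1
    have haN : a = N := (List.mem_singleton.mp (ha ▸ hNS)).symm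
    rw [ha, haN]
    have hfilt : (([N] : List Int).filter (fun x => x != N)) = [] := by simp
    rw [hfilt, pv_pvOut_ne_one (by simp), pv_pvOut_singleton]
    omega
  · obtain ⟨a, b, hab⟩ := List.length_eq_two.mp h2
    have hne : a ≠ b := by
      rw [hab] at hnodup
      exact (List.nodup_cons.mp hnodup).1 ∘ (by simp [·])
    have hbmem : b ∈ S := by rw [hab]; simp
    have hamem : a ∈ S := by rw [hab]; simp
    have hNab : N = a ∨ N = b := by
      rw [hab] at hNS
      simpa using hNS
    rw [hab]
    rcases hNab with rfl | rfl
    · have hbN : (b != N) = true := bne_iff_ne.mpr fun h => hne h.symm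
      have hfilt : (([N, b] : List Int).filter (fun x => x != N)) = [b] := by
        simp [List.filter_cons, hbN]
      rw [hfilt, pv_pvOut_singleton, pv_pvOut_ne_one (by simp)]
      have := hmem_pos b hbmem
      omega
    · have haN : (a != N) = true := bne_iff_ne.mpr hne
      have hfilt : (([a, N] : List Int).filter (fun x => x != N)) = [a] := by
        simp [List.filter_cons, haN]
      rw [hfilt, pv_pvOut_singleton, pv_pvOut_ne_one (by simp)]
      have := hmem_pos a hamem
      omega
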